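-- pv_equiv track=rewrite | github.com/alexandraback/datacollection | solutions_5639104758808576_1/Python/Sh4rK/main.py | solve
-- ===== SOURCE A (Python) =====
-- def solve(people):
--     total = 0
--     needed = 0
--     for level, num in enumerate(people):
--         if total < level:
--             needed += level - total
--             total += level - total
--         total += int(num)
--     return needed
-- ===== SOURCE B (Python) =====
-- def solve(people):
--     # pass 1: materialize the prefix sums before each level
--     sums = []
--     run = 0
--     for num in people:
--         sums.append(run)
--         run += int(num)
--     # pass 2: the answer is the largest deficit level - sums[level], floored at 0
--     best = 0
--     level = 0
--     for s in sums:
--         if level - s > best: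
--             best = level - s
--         level += 1
--     return best
-- ===== Notes on version B (the rewrite author's own statement) =====
-- stated objective: alternative
-- what changed: B replaces A's single pass that patches a running total and accumulates deficit increments with two staged passes: it first materializes the list of prefix sums, then takes the maximum of (level - prefix) over it, using the identity answer = max(0, max_i (i - sum(people[:i]))).
import Mathlib
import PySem

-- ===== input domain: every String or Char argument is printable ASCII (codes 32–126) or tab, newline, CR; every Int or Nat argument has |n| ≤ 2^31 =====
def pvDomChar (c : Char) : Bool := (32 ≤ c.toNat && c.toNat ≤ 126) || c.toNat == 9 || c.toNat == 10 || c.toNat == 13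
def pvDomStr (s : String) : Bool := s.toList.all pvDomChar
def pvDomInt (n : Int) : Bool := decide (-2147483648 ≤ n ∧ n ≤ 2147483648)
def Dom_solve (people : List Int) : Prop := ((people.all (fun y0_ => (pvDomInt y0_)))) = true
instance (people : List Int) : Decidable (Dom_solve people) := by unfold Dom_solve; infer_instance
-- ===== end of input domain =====

-- B replaces A's deficit-patching single pass with two staged passes (materialize prefix sums,
-- then take the max deficit); same O(n) cost, different decomposition (objective: alternative).


-- ===== PORT A =====
-- state = (total, needed); the if-branch adds the deficit to both, then total += num
def solveStep (s : Int × Int) (ln : Int × Int) : Int × Int :=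
  let s' := if s.1 < ln.1 then (s.1 + (ln.1 - s.1), s.2 + (ln.1 - s.1)) else s
  (s'.1 + ln.2, s'.2)

def solve (people : List Int) : Int :=
  ((PySem.List.enumerate people).foldl solveStep (0, 0)).2

-- ===== PORT B =====
-- pass 1: the prefix sums before each level, built front to back
def buildPre : List Int → Int → List Int
  | [], _ => []
  | x :: xs, run => run :: buildPre xs (run + x)

-- pass 2: largest deficit level - s over the materialized list, with a level counter
def deficitStep (s : Int × Int) (p : Int) : Int × Int :=
  (if s.2 - p > s.1 then s.2 - p else s.1, s.2 + 1)

def solve_alt (people : List Int) : Int :=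
  ((buildPre people 0).foldl deficitStep (0, 0)).1

-- ===== PRECONDITION & SPEC =====
def Spec_solve (people : List Int) (out : Int) : Prop := out = solve_alt people
instance (people : List Int) (out : Int) : Decidable (Spec_solve people out) := by unfold Spec_solve; infer_instance

-- ===== CLAIM (what is proved, stated in full; the proofs are below) =====
def Claim_equal_solve : Prop := ∀ (people : List Int), Dom_solve people → Spec_solve people (solve people)

-- ===== LEMMAS AND PROOFS =====
-- Invariant: A's total equals run + needed, where run is the prefix sum B records; one step of
-- A from (run + b, b) at level lvl produces needed' = max b (lvl - run), exactly B's step.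
theorem solve_fold_eq (l : List Int) : ∀ (lvl run b : Int),
    ((PySem.List.enumerate l lvl).foldl solveStep (run + b, b)).2 =
    ((buildPre l run).foldl deficitStep (b, lvl)).1 := by
  induction l with
  | nil => intro lvl run b; simp [PySem.List.enumerate_nil, buildPre]
  | cons x xs ih =>
    intro lvl run b
    simp only [PySem.List.enumerate_cons, buildPre, List.foldl_cons]
    have hA : solveStep (run + b, b) (lvl, x) =
        ((run + x) + (if lvl - run > b then lvl - run else b),
         (if lvl - run > b then lvl - run else b)) := by
      have hiff : (lvl - run > b) = (run + b < lvl) := by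
        apply propext; constructor <;> intro <;> omega
      simp only [solveStep, hiff]
      split_ifs with h1 <;> simp [Prod.ext_iff] <;> omega
    have hB : deficitStep (b, lvl) run =
        ((if lvl - run > b then lvl - run else b), lvl + 1) := rfl
    rw [hA, hB]
    exact ih (lvl + 1) (run + x) _

-- ===== VERDICT (by name: the statement is the Claim_ definition above) =====
theorem solve_spec : Claim_equal_solve := by
  intro people _
  unfold Spec_solve solve solve_alt
  have := solve_fold_eq people 0 0 0
  simpa using this
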